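-- pv_equiv track=rewrite | github.com/BadTrL/text-praline | rag_testing/build_eval_dataset.py | compute_page_offsets
-- ===== SOURCE A (Python) =====
-- from typing import Any, Dict, Iterable, List, Sequence, Tuple
--
-- def compute_page_offsets(pages: Sequence[str]) -> List[int]:
--     offsets = [0]
--     total = 0
--     sep = "\n\n\n"
--     for i, page in enumerate(pages):
--         total += len(page)
--         if i < len(pages) - 1:
--             total += len(sep)
--         offsets.append(total)
--     return offsets
-- ===== SOURCE B (Python) =====
-- from itertools import accumulate
--
-- def compute_page_offsets(pages):
--     sep_len = len("\n\n\n")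
--     prefix = list(accumulate((len(p) for p in pages), initial=0))
--     last = max(len(pages) - 1, 0)
--     return [prefix[k] + sep_len * min(k, last) for k in range(len(pages) + 1)]
-- ===== Notes on version B (the rewrite author's own statement) =====
-- stated objective: alternative
-- what changed: Replaces the single enumerate loop with a per-iteration last-element branch by two differently shaped passes: a prefix-sum (itertools.accumulate) of the bare page lengths, then a comprehension adding the separator contribution in closed form as sep_len*min(k, len(pages)-1).
import Mathlib
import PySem

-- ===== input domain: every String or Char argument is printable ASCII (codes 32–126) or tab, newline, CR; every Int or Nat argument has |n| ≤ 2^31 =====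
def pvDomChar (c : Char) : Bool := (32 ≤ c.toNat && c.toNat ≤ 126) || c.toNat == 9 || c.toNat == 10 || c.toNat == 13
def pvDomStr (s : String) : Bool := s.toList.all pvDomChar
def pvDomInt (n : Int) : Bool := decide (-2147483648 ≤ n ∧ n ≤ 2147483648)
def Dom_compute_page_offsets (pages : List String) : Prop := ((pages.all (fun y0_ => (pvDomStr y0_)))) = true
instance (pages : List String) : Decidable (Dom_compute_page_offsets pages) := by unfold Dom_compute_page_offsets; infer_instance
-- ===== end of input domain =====

-- B replaces A's single loop (running total + last-element branch) by a prefix-sum pass over the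
-- bare page lengths plus a closed-form separator term sep_len * min(k, len(pages)-1); alternative
-- decomposition, same O(n) cost.

-- ===== PORT A =====
def compute_page_offsets (pages : List String) : List Int :=
  let sep := "\n\n\n"
  ((PySem.List.enumerate pages).foldl
    (fun (st : List Int × Int) ip =>
      let total := st.2 + PySem.Str.len ip.2
      let total := if ip.1 < (pages.length : Int) - 1 then total + PySem.Str.len sep else total
      (st.1 ++ [total], total)) ([0], 0)).1

-- ===== PORT B =====
def compute_page_offsets_alt (pages : List String) : List Int :=
  let sepLen := PySem.Str.len "\n\n\n"
  let pre := List.scanl (· + ·) 0 (pages.map PySem.Str.len)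
  let last : Int := max ((pages.length : Int) - 1) 0
  (List.range (pages.length + 1)).map (fun k => pre.getD k 0 + sepLen * min (k : Int) last)

-- ===== PRECONDITION & SPEC =====
def Spec_compute_page_offsets (pages : List String) (out : List Int) : Prop := out = compute_page_offsets_alt pages
instance (pages : List String) (out : List Int) : Decidable (Spec_compute_page_offsets pages out) := by unfold Spec_compute_page_offsets; infer_instance

-- ===== CLAIM (what is proved, stated in full; the proofs are below) =====
def Claim_equal_compute_page_offsets : Prop := ∀ (pages : List String), Dom_compute_page_offsets pages → Spec_compute_page_offsets pages (compute_page_offsets pages)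

-- ===== LEMMAS AND PROOFS =====

-- running-total sequence produced by A's loop body (proof-only helper)
def pvOffs (N : Int) (s t : Int) : List String → List Int
  | [] => []
  | p :: ps =>
      let t2 := if s < N - 1 then t + PySem.Str.len p + 3 else t + PySem.Str.len p
      t2 :: pvOffs N (s + 1) t2 ps

theorem pvFoldA (N : Int) (xs : List String) : ∀ (s : Int) (acc : List Int) (t : Int),
    ((PySem.List.enumerate xs s).foldl
      (fun (st : List Int × Int) ip =>
        let total := st.2 + PySem.Str.len ip.2
        let total := if ip.1 < N - 1 then total + 3 else total
        (st.1 ++ [total], total)) (acc, t)).1 = acc ++ pvOffs N s t xs := by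
  induction xs with
  | nil => intro s acc t; simp [PySem.List.enumerate_nil, pvOffs]
  | cons p ps ih =>
      intro s acc t
      rw [PySem.List.enumerate_cons, List.foldl_cons]
      dsimp only
      simp only [pvOffs]
      split_ifs with h <;> rw [ih, List.append_assoc] <;> rfl

theorem pvOffs_eq (N : Int) (xs : List String) : ∀ (s t : Int),
    pvOffs N s t xs = (List.range xs.length).map
      (fun m => t + ((xs.map PySem.Str.len).take (m + 1)).sum
                + 3 * min ((m : Int) + 1) (max (N - 1 - s) 0)) := by
  induction xs with
  | nil => intro s t; simp [pvOffs]
  | cons p ps ih =>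
      intro s t
      simp only [pvOffs, List.length_cons, List.range_succ_eq_map, List.map_cons, List.map_map]
      congr 1
      · simp only [List.take_succ_cons, List.take_zero, List.sum_cons, List.sum_nil,
          Nat.cast_zero, add_zero]
        split_ifs with h <;> omega
      · rw [ih]
        apply List.map_congr_left
        intro m _
        simp only [Function.comp, List.take_succ_cons, List.sum_cons, Nat.cast_succ]
        split_ifs with h <;> omega

theorem pvScanl_getD (l : List Int) : ∀ (t : Int) (k : Nat), k ≤ l.length →
    (List.scanl (· + ·) t l).getD k 0 = t + (l.take k).sum := by
  induction l with
  | nil =>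
      intro t k hk
      have : k = 0 := by simpa using hk
      subst this; simp [List.scanl_nil]
  | cons x l ih =>
      intro t k hk
      cases k with
      | zero => simp [List.scanl_cons]
      | succ k =>
          simp only [List.scanl_cons, List.getD_cons_succ, List.take_succ_cons, List.sum_cons]
          rw [ih (t + x) k (by simpa using hk)]
          ring

-- ===== VERDICT (by name: the statement is the Claim_ definition above) =====
theorem compute_page_offsets_spec : Claim_equal_compute_page_offsets := by
  intro pages _
  unfold Spec_compute_page_offsets compute_page_offsets compute_page_offsets_alt
  have hsep : PySem.Str.len "\n\n\n" = 3 := by decide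
  simp only [hsep]
  rw [pvFoldA (pages.length : Int) pages 0 [0] 0, pvOffs_eq]
  rw [List.range_succ_eq_map, List.map_cons, List.map_map]
  simp only [List.singleton_append]
  congr 1
  · rw [pvScanl_getD _ 0 0 (by simp)]
    simp
  · apply List.map_congr_left
    intro m hm
    simp only [Function.comp, Nat.cast_succ]
    rw [pvScanl_getD _ 0 (m+1) (by simpa using Nat.succ_le_of_lt (List.mem_range.mp hm))]
    omega
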